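-- pv_equiv track=rewrite | github.com/pypi-data/pypi-mirror-392 | packages/depgate/depgate-0.7.0.tar.gz/depgate-0.7.0/src/versioning/parser.py | _split_spec
-- ===== SOURCE A (Python) =====
-- from typing import Optional, Tuple, List, Dict
--
-- def _split_spec(req: str) -> Tuple[str, Optional[str]]:
--     """Best-effort split of a requirement string into (name, spec).
--
--     Handles patterns like:
--       - "package>=1.2.3"
--       - "package[extra1,extra2]>=1.2; python_version>='3.10'"
--       - "package" (no spec)
--     """
--     if not req:
--         return "", None
--
--     s = req.strip()
--     # Drop environment markers
--     s = s.split(";", 1)[0].strip()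
--
--     # Separate extras (PEP 508) from the base name section
--     if "[" in s:
--         name_base = s.split("[", 1)[0].strip()
--     else:
--         name_base = s
--
--     # Find first comparator occurrence after the base name segment
--     comparators = ["===", ">=", "<=", "==", "~=", "!=", ">", "<", " "]
--     start = len(name_base)
--     first_idx: Optional[int] = None
--     for op in comparators:
--         idx = s.find(op, start)
--         if idx != -1:
--             first_idx = idx if first_idx is None else min(first_idx, idx)
--     spec: Optional[str] = None
--     if first_idx is not None and first_idx >= start and first_idx < len(s):
--         spec = s[first_idx:].strip()
--         name_text = s[:first_idx].strip()
--     else: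
--         name_text = name_base.strip()
--
--     # PEP 503 normalization for name
--     name = name_text.lower().replace("_", "-")
--     return name, (spec if spec else None)
-- ===== SOURCE B (Python) =====
-- from typing import Optional, Tuple
--
-- _OPS = ("===", ">=", "<=", "==", "~=", "!=", ">", "<", " ")
--
-- def _split_spec(req: str) -> Tuple[str, Optional[str]]:
--     """Split a requirement string into (normalized name, spec).
--
--     Instead of searching the string once per comparator and taking the
--     minimum position, scan positions left to right once and stop at the
--     first one where any comparator starts.
--     """
--     if not req:
--         return "", None
--
--     s = req.strip().split(";", 1)[0].strip()
--     name_base = s.split("[", 1)[0].strip() if "[" in s else s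
--
--     for i in range(len(name_base), len(s)):
--         if s.startswith(_OPS, i):
--             name = s[:i].strip().lower().replace("_", "-")
--             return name, (s[i:].strip() or None)
--     return name_base.lower().replace("_", "-"), None
-- ===== Notes on version B (the rewrite author's own statement) =====
-- stated objective: alternative
-- what changed: A scans the whole string once per comparator (nine find calls) and takes the minimum hit position; B makes a single left-to-right scan over positions starting at the end of the base name and stops at the first position where any comparator starts (str.startswith with a tuple).
import Mathlib
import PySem

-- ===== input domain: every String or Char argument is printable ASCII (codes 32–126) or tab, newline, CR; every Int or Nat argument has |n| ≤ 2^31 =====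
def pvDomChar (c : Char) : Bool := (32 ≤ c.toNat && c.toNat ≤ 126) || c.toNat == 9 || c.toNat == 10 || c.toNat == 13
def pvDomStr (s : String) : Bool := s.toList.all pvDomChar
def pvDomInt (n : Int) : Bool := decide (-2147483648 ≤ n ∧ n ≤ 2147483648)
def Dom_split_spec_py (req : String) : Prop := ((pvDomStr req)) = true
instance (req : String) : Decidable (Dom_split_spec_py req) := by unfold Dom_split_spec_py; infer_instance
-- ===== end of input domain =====

-- B replaces A's nine whole-string `find`+min passes by a single left-to-right scan that
-- stops at the first position where any comparator starts (objective: alternative).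

-- ===== PORT A =====
def split_spec_py (req : String) : String × Option String :=
  if req == "" then ("", none)
  else
    let s0 := PySem.Str.strip req
    -- s.split(";", 1)[0]: the separator is non-empty, so splitMax? is `some` of a
    -- non-empty list and getD/headD are exact here (likewise for "[").
    let s := PySem.Str.strip (((PySem.Str.splitMax? s0 ";" 1).getD []).headD "")
    let name_base :=
      if PySem.Str.isIn "[" s then
        PySem.Str.strip (((PySem.Str.splitMax? s "[" 1).getD []).headD "")
      else s
    let start : Int := PySem.Str.len name_base
    let comparators : List String := ["===", ">=", "<=", "==", "~=", "!=", ">", "<", " "]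
    let first_idx : Option Int :=
      comparators.foldl (fun acc op =>
        let idx := PySem.Str.findFrom s op start
        if idx ≠ -1 then some (match acc with | none => idx | some j => min j idx) else acc) none
    match first_idx with
    | some fi =>
        if start ≤ fi ∧ fi < PySem.Str.len s then
          let spec := PySem.Str.strip (PySem.Str.slice s (some fi) none)
          let name_text := PySem.Str.strip (PySem.Str.slice s none (some fi))
          (PySem.Str.replace (PySem.Str.lower name_text) "_" "-",
           if spec ≠ "" then some spec else none)
        else
          (PySem.Str.replace (PySem.Str.lower (PySem.Str.strip name_base)) "_" "-", none)
    | none =>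
        (PySem.Str.replace (PySem.Str.lower (PySem.Str.strip name_base)) "_" "-", none)

-- ===== PORT B =====
-- the module constant _OPS of Source B
def pvOps : List String := ["===", ">=", "<=", "==", "~=", "!=", ">", "<", " "]

def split_spec_py_alt (req : String) : String × Option String :=
  if req == "" then ("", none)
  else
    let s0 := PySem.Str.strip req
    let s := PySem.Str.strip (((PySem.Str.splitMax? s0 ";" 1).getD []).headD "")
    let name_base :=
      if PySem.Str.isIn "[" s then
        PySem.Str.strip (((PySem.Str.splitMax? s "[" 1).getD []).headD "")
      else s
    -- `s.startswith(_OPS, i)` = some op of _OPS starts at i = startswith on the slice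
    -- from i (exact: here 0 ≤ i < len(s)); the for-loop with early return is find?.
    match (PySem.List.pyRange (PySem.Str.len name_base) (PySem.Str.len s)).find?
        (fun i => pvOps.any fun op => PySem.Str.startswith (PySem.Str.slice s (some i) none) op) with
    | some i =>
        (PySem.Str.replace (PySem.Str.lower (PySem.Str.strip (PySem.Str.slice s none (some i)))) "_" "-",
         let spec := PySem.Str.strip (PySem.Str.slice s (some i) none)
         if spec ≠ "" then some spec else none)
    | none =>
        (PySem.Str.replace (PySem.Str.lower name_base) "_" "-", none)

-- ===== PRECONDITION & SPEC =====
def Spec_split_spec_py (req : String) (out : String × Option String) : Prop := out = split_spec_py_alt req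
instance (req : String) (out : String × Option String) : Decidable (Spec_split_spec_py req out) := by unfold Spec_split_spec_py; infer_instance

-- ===== CLAIM (what is proved, stated in full; the proofs are below) =====
def Claim_equal_split_spec_py : Prop := ∀ (req : String), Dom_split_spec_py req → Spec_split_spec_py req (split_spec_py req)

-- ===== LEMMAS AND PROOFS =====

-- strip is idempotent
lemma pv_dropWhile_idem {α : Type} (p : α → Bool) (l : List α) :
    List.dropWhile p (List.dropWhile p l) = List.dropWhile p l := by
  induction l with
  | nil => rfl
  | cons a t ih =>
    by_cases h : p a
    · simp [h, ih]
    · simp [h]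

lemma pv_dropWhile_eq_self_of_prefix {α : Type} (p : α → Bool) (v w : List α)
    (hw : List.dropWhile p w = w) (hvw : v <+: w) : List.dropWhile p v = v := by
  cases v with
  | nil => rfl
  | cons a t =>
    obtain ⟨u, rfl⟩ := hvw
    rw [List.cons_append] at hw
    rw [List.dropWhile_cons] at hw ⊢
    by_cases hpa : p a
    · exfalso
      rw [if_pos hpa] at hw
      have hlen := congrArg List.length hw
      have h2 := (List.dropWhile_sublist (l := t ++ u) p).length_le
      simp only [List.length_cons] at hlen
      omega
    · simp [hpa]

lemma pv_lstrip_rstrip (y : List Char) (hy : PySem.Chars.lstrip y = y) :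
    PySem.Chars.lstrip (PySem.Chars.rstrip y) = PySem.Chars.rstrip y := by
  unfold PySem.Chars.lstrip at hy ⊢
  apply pv_dropWhile_eq_self_of_prefix _ _ y hy
  unfold PySem.Chars.rstrip
  have : (List.dropWhile PySem.Chars.isspace y.reverse).reverse <+: y.reverse.reverse :=
    List.reverse_prefix.mpr (List.dropWhile_suffix _)
  simpa using this

lemma pv_rstrip_idem (y : List Char) :
    PySem.Chars.rstrip (PySem.Chars.rstrip y) = PySem.Chars.rstrip y := by
  unfold PySem.Chars.rstrip
  rw [List.reverse_reverse, pv_dropWhile_idem]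

lemma pv_strip_strip (x : List Char) :
    PySem.Chars.strip (PySem.Chars.strip x) = PySem.Chars.strip x := by
  unfold PySem.Chars.strip
  rw [pv_lstrip_rstrip _ (by unfold PySem.Chars.lstrip; exact pv_dropWhile_idem _ _),
      pv_rstrip_idem]

lemma pv_strip_strip' (x : String) :
    PySem.Str.strip (PySem.Str.strip x) = PySem.Str.strip x := by
  rw [← String.toList_inj]
  simp [PySem.Str.toList_strip, pv_strip_strip]

-- findFrom with a start past the end finds nothing
lemma pv_findFrom_past (cs sub : List Char) (st : Int) (h0 : 0 ≤ st)
    (h : (cs.length : Int) < st) : PySem.Chars.findFrom cs sub st none = -1 := by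
  simp only [PySem.Chars.findFrom]
  split_ifs <;> omega

-- A's fold over the comparator list: characterisation
lemma pv_fold_none (f : String → Int) (ops : List String) (acc : Option Int) :
    ops.foldl (fun acc op =>
        let idx := f op
        if idx ≠ -1 then some (match acc with | none => idx | some j => min j idx) else acc) acc
      = none ↔ (acc = none ∧ ∀ op ∈ ops, f op = -1) := by
  induction ops generalizing acc with
  | nil => simp [List.foldl]
  | cons op rest ih =>
    simp only [List.foldl]
    by_cases hop : f op = -1
    · rw [if_neg (by simp [hop])]
      rw [ih]
      constructor
      · rintro ⟨h1, h2⟩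
        refine ⟨h1, ?_⟩
        intro o ho
        rcases List.mem_cons.mp ho with rfl | ho
        · exact hop
        · exact h2 o ho
      · rintro ⟨h1, h2⟩
        exact ⟨h1, fun o ho => h2 o (List.mem_cons_of_mem _ ho)⟩
    · rw [if_pos (by simpa using hop)]
      rw [ih]
      simp only [Option.some_ne_none, false_and, false_iff, not_and]
      intro h1
      exact fun h2 => hop (h2 op (List.mem_cons_self))
  
lemma pv_fold_some (f : String → Int) (ops : List String) (acc : Option Int) (m : Int)
    (h : ops.foldl (fun acc op =>
        let idx := f op
        if idx ≠ -1 then some (match acc with | none => idx | some j => min j idx) else acc) acc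
      = some m) :
    (acc = some m ∨ ∃ op ∈ ops, f op ≠ -1 ∧ f op = m) ∧
    (∀ j, acc = some j → m ≤ j) ∧
    (∀ op ∈ ops, f op ≠ -1 → m ≤ f op) := by
  induction ops generalizing acc with
  | nil =>
    simp only [List.foldl] at h
    exact ⟨Or.inl h, fun j hj => by rw [hj] at h; simp at h; omega, by simp⟩
  | cons op rest ih =>
    simp only [List.foldl] at h
    obtain ⟨hmem, hmono, hops⟩ := ih _ h
    by_cases hop : f op = -1
    · rw [if_neg (by simpa using hop)] at hmem hmono
      refine ⟨?_, hmono, ?_⟩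
      · rcases hmem with h1 | ⟨o, ho, h1, h2⟩
        · exact Or.inl h1
        · exact Or.inr ⟨o, List.mem_cons_of_mem _ ho, h1, h2⟩
      · intro o ho hne
        rcases List.mem_cons.mp ho with rfl | ho
        · exact absurd hop hne
        · exact hops o ho hne
    · rw [if_pos (by simpa using hop)] at hmem hmono
      cases acc with
      | none =>
        simp only at hmem hmono
        have hmop : m ≤ f op := hmono (f op) rfl
        refine ⟨?_, by simp, ?_⟩
        · rcases hmem with h1 | ⟨o, ho, h1, h2⟩
          · exact Or.inr ⟨op, List.mem_cons_self, hop, Option.some_inj.mp h1⟩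
          · exact Or.inr ⟨o, List.mem_cons_of_mem _ ho, h1, h2⟩
        · intro o ho hne
          rcases List.mem_cons.mp ho with rfl | ho
          · exact hmop
          · exact hops o ho hne
      | some j =>
        simp only at hmem hmono
        have hminj : m ≤ min j (f op) := hmono (min j (f op)) rfl
        have hj1 := min_le_left j (f op)
        have hj2 := min_le_right j (f op)
        refine ⟨?_, ?_, ?_⟩
        · rcases hmem with h1 | ⟨o, ho, h1, h2⟩
          · have h1' : min j (f op) = m := Option.some_inj.mp h1
            rcases min_choice j (f op) with hmin2 | hmin2
            · exact Or.inl (by rw [← h1', hmin2])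
            · exact Or.inr ⟨op, List.mem_cons_self, hop, by omega⟩
          · exact Or.inr ⟨o, List.mem_cons_of_mem _ ho, h1, h2⟩
        · intro j' hj'
          have hjj : j = j' := Option.some_inj.mp hj'
          omega
        · intro o ho hne
          rcases List.mem_cons.mp ho with rfl | ho
          · omega
          · exact hops o ho hne

-- B's find? over a range: characterisation
lemma pv_find?_pyRange_none (p : Int → Bool) (a b : Int)
    (h : ∀ x : Int, a ≤ x → x < b → p x = false) :
    (PySem.List.pyRange a b).find? p = none := by
  rw [List.find?_eq_none]
  intro x hx
  obtain ⟨h1, h2⟩ := PySem.List.mem_pyRange_one.mp hx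
  simp [h x h1 h2]

lemma pv_find?_pyRange_some (p : Int → Bool) (k n t : Nat) (h1 : k ≤ t) (h2 : t < n)
    (hfalse : ∀ j : Nat, k ≤ j → j < t → p (j : Int) = false) (htrue : p (t : Int) = true) :
    (PySem.List.pyRange (k : Int) (n : Int)).find? p = some (t : Int) := by
  rw [PySem.List.pyRange_one_append (k : Int) (t : Int) (n : Int) (by omega) (by omega)]
  rw [List.find?_append]
  have hleft : (PySem.List.pyRange (k : Int) (t : Int)).find? p = none := by
    apply pv_find?_pyRange_none
    intro x hx1 hx2
    have hx0 : 0 ≤ x := le_trans (by omega) hx1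
    have : x = ((x.toNat : Nat) : Int) := by omega
    rw [this]
    exact hfalse x.toNat (by omega) (by omega)
  rw [hleft]
  rw [PySem.List.pyRange_one_cons (by omega : (t : Int) < (n : Int))]
  simp [htrue]

-- a prefix somewhere to the right of k is an infix of the k-th suffix
lemma pv_infix_of_prefix_drop (cs op : List Char) (k j : Nat) (hkj : k ≤ j)
    (h : op <+: cs.drop j) : op <:+: cs.drop k := by
  rw [show j = k + (j - k) by omega, ← List.drop_drop] at h
  exact h.isInfix.trans (List.drop_suffix _ _).isInfix

-- B's position test holds iff some comparator is a prefix there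
lemma pv_pred_iff (s : String) (i : Nat) :
    ((pvOps.any fun op => PySem.Str.startswith (PySem.Str.slice s (some (i : Int)) none) op) = true)
      ↔ ∃ op ∈ pvOps, op.toList <+: s.toList.drop i := by
  have hsl : (PySem.Str.slice s (some (i : Int)) none).toList = s.toList.drop i := by
    rw [PySem.Str.toList_slice]
    exact PySem.List.slice_from_natCast _ i
  simp only [List.any_eq_true, PySem.Str.startswith_eq, PySem.Chars.startswith_iff, hsl]

-- every comparator is a non-empty string
lemma pv_ops_ne_nil (op : String) (hop : op ∈ pvOps) : op.toList ≠ [] := by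
  unfold pvOps at hop
  rcases List.mem_cons.mp hop with rfl | hop <;> try decide
  rcases List.mem_cons.mp hop with rfl | hop <;> try decide
  rcases List.mem_cons.mp hop with rfl | hop <;> try decide
  rcases List.mem_cons.mp hop with rfl | hop <;> try decide
  rcases List.mem_cons.mp hop with rfl | hop <;> try decide
  rcases List.mem_cons.mp hop with rfl | hop <;> try decide
  rcases List.mem_cons.mp hop with rfl | hop <;> try decide
  rcases List.mem_cons.mp hop with rfl | hop <;> try decide
  rcases List.mem_cons.mp hop with rfl | hop
  · decide
  · simp at hop

-- the heart of the equivalence: A's "minimum of the per-comparator finds" equals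
-- B's "first position at which some comparator starts"
lemma pv_idx (s nb : String) :
    (["===", ">=", "<=", "==", "~=", "!=", ">", "<", " "] : List String).foldl (fun acc op =>
        let idx := PySem.Str.findFrom s op (PySem.Str.len nb)
        if idx ≠ -1 then some (match acc with | none => idx | some j => min j idx) else acc) none
    = (PySem.List.pyRange (PySem.Str.len nb) (PySem.Str.len s)).find?
        (fun i => pvOps.any fun op => PySem.Str.startswith (PySem.Str.slice s (some i) none) op) := by
  have hlen_nb : PySem.Str.len nb = ((nb.toList.length : Nat) : Int) := PySem.Str.len_eq nb
  have hlen_s : PySem.Str.len s = ((s.toList.length : Nat) : Int) := PySem.Str.len_eq s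
  set k := nb.toList.length with hk
  set n := s.toList.length with hn
  have hfC : ∀ op : String, PySem.Str.findFrom s op (PySem.Str.len nb)
      = PySem.Chars.findFrom s.toList op.toList (k : Int) := by
    intro op
    rw [hlen_nb, PySem.Str.findFrom_eq]
  cases hfold : (["===", ">=", "<=", "==", "~=", "!=", ">", "<", " "] : List String).foldl
      (fun acc op =>
        let idx := PySem.Str.findFrom s op (PySem.Str.len nb)
        if idx ≠ -1 then some (match acc with | none => idx | some j => min j idx) else acc) none with
  | none =>
    obtain ⟨-, hall⟩ :=
      (pv_fold_none (fun op => PySem.Str.findFrom s op (PySem.Str.len nb)) _ none).mp hfold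
    symm
    rw [hlen_nb, hlen_s]
    apply pv_find?_pyRange_none
    intro x hx1 hx2
    have hx0 : 0 ≤ x := le_trans (Int.natCast_nonneg k) hx1
    have hxt : x = ((x.toNat : Nat) : Int) := (Int.toNat_of_nonneg hx0).symm
    simp only [Bool.eq_false_iff]
    intro htrue
    rw [hxt] at htrue
    obtain ⟨op, hop, hpre⟩ := (pv_pred_iff s x.toNat).mp htrue
    have hkx : k ≤ x.toNat := by omega
    have hinf := pv_infix_of_prefix_drop s.toList op.toList k x.toNat hkx hpre
    have hm1 : PySem.Chars.findFrom s.toList op.toList (k : Int) = -1 := by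
      rw [← hfC op]; exact hall op hop
    exact (PySem.Chars.findFrom_natCast_eq_neg_one_iff s.toList op.toList k (by omega)).mp hm1 hinf
  | some m =>
    obtain ⟨hmem, -, hmin⟩ :=
      pv_fold_some (fun op => PySem.Str.findFrom s op (PySem.Str.len nb)) _ none m hfold
    rcases hmem with h1 | ⟨op₀, hop₀, hne₀, heq₀⟩
    · exact absurd h1 (by simp)
    have hne₀' : PySem.Chars.findFrom s.toList op₀.toList (k : Int) ≠ -1 := by
      rw [← hfC op₀]; exact hne₀
    have hkn : k ≤ n := by
      by_contra hkn
      exact hne₀' (pv_findFrom_past _ _ _ (Int.natCast_nonneg k) (by omega))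
    obtain ⟨hkm, hpre₀, -⟩ := PySem.Chars.findFrom_natCast_spec s.toList op₀.toList k hkn hne₀'
    have hmC : PySem.Chars.findFrom s.toList op₀.toList (k : Int) = m := by
      rw [← hfC op₀]; exact heq₀
    rw [hmC] at hkm hpre₀
    have hm0 : 0 ≤ m := le_trans (Int.natCast_nonneg k) hkm
    have hmt : m = ((m.toNat : Nat) : Int) := (Int.toNat_of_nonneg hm0).symm
    have hkt : k ≤ m.toNat := by omega
    have htn : m.toNat < n := by
      by_contra htn
      have hnil : s.toList.drop m.toNat = [] := List.drop_eq_nil_iff.mpr (by omega)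
      rw [hnil] at hpre₀
      exact pv_ops_ne_nil op₀ hop₀ (List.prefix_nil.mp hpre₀)
    symm
    rw [hlen_nb, hlen_s, hmt]
    apply pv_find?_pyRange_some _ k n m.toNat hkt htn
    · intro j hj1 hj2
      simp only [Bool.eq_false_iff]
      intro htrue
      obtain ⟨op, hop, hpre⟩ := (pv_pred_iff s j).mp htrue
      have hinf := pv_infix_of_prefix_drop s.toList op.toList k j hj1 hpre
      have hne : PySem.Chars.findFrom s.toList op.toList (k : Int) ≠ -1 := fun h =>
        (PySem.Chars.findFrom_natCast_eq_neg_one_iff s.toList op.toList k hkn).mp h hinf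
      have hge : m ≤ PySem.Chars.findFrom s.toList op.toList (k : Int) := by
        have hx := hmin op hop (by rw [hfC op]; exact hne)
        rw [hfC op] at hx; exact hx
      obtain ⟨-, -, hmin'⟩ := PySem.Chars.findFrom_natCast_spec s.toList op.toList k hkn hne
      exact hmin' j hj1 (by omega) hpre
    · exact (pv_pred_iff s m.toNat).mpr ⟨op₀, hop₀, hpre₀⟩

-- ===== VERDICT (by name: the statement is the Claim_ definition above) =====
set_option maxHeartbeats 1000000 in
theorem split_spec_py_spec : Claim_equal_split_spec_py := by
  intro req _
  unfold Spec_split_spec_py split_spec_py split_spec_py_alt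
  by_cases hreq : (req == "") = true
  · rw [if_pos hreq, if_pos hreq]
  · rw [if_neg hreq, if_neg hreq]
    simp only []
    set s : String :=
      PySem.Str.strip (((PySem.Str.splitMax? (PySem.Str.strip req) ";" 1).getD []).headD "") with hsdef
    set nb : String :=
      (if PySem.Str.isIn "[" s then
        PySem.Str.strip (((PySem.Str.splitMax? s "[" 1).getD []).headD "")
      else s) with hnbdef
    rw [pv_idx s nb]
    have hnb : PySem.Str.strip nb = nb := by
      rw [hnbdef]
      split
      · exact pv_strip_strip' _
      · rw [hsdef]; exact pv_strip_strip' _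
    generalize hr : (PySem.List.pyRange (PySem.Str.len nb) (PySem.Str.len s)).find?
        (fun i => pvOps.any fun op => PySem.Str.startswith (PySem.Str.slice s (some i) none) op) = r
    cases r with
    | none =>
      simp only []
      rw [hnb]
    | some i =>
      have hmem := PySem.List.mem_pyRange_one.mp (List.mem_of_find?_eq_some hr)
      simp only []
      rw [if_pos hmem]
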